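-- pv_equiv track=rewrite | github.com/linke131/btcloud | data/plugins/folder/btwaf-9.2.1/btwaf/white.py | zhuanhuang
-- ===== SOURCE A (Python) =====
-- def ip2long(ip):
--     ips = ip.split('.')
--     if len(ips) != 4: return 0
--     iplong = 2 ** 24 * int(ips[0]) + 2 ** 16 * int(ips[1]) + 2 ** 8 * int(ips[2]) + int(ips[3])
--     return iplong
--
-- def zhuanhuang(aaa):
--     ac = []
--     cccc = 0
--     list = []
--     list2 = []
--     for i in range(len(aaa)):
--         for i2 in aaa[i]:
--             dd = ''
--             coun = 0
--             for i3 in i2: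
--                 if coun == 3:
--                     dd += str(i3)
--                 else:
--                     dd += str(i3) + '.'
--                 coun += 1
--             list.append(ip2long(dd))
--             cccc += 1
--             if cccc % 2 == 0:
--                 aa = []
--                 bb = []
--                 aa.append(list[0])
--                 bb.append(list[1])
--                 cc = []
--                 cc.append(aa)
--                 cc.append(bb)
--                 ac.append(list)
--                 list = []
--                 list2 = []
--     return ac
-- ===== SOURCE B (Python) =====
-- # B rewrites the conversion and grouping: each IP becomes a dotted string with
-- # '.'.join(map(str, ip)) fed to the unchanged module helper ip2long (no per-octet
-- # counter loop), and pairing is a slice comprehension over range(0, len-1, 2) instead of A's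
-- # cccc/mod-2 flushing state machine with its dead aa/bb/cc/list2 machinery.
-- # Note: on an IP with exactly 3 octets A raises ValueError (int('')), while B's
-- # join yields 3 parts so ip2long returns 0 there (outside the stated Pre_).
-- def ip2long(ip):
--     ips = ip.split('.')
--     if len(ips) != 4: return 0
--     iplong = 2 ** 24 * int(ips[0]) + 2 ** 16 * int(ips[1]) + 2 ** 8 * int(ips[2]) + int(ips[3])
--     return iplong
--
-- def zhuanhuang(aaa):
--     longs = [ip2long('.'.join(map(str, ip))) for grp in aaa for ip in grp]
--     return [longs[i:i + 2] for i in range(0, len(longs) - 1, 2)]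
-- ===== Notes on version B (the rewrite author's own statement) =====
-- stated objective: simpler
-- what changed: A's per-octet counter loop that hand-assembles the dotted string and its cccc/mod-2 pair-flushing state machine (with dead aa/bb/cc/list2 code) are replaced by '.'.join(map(str, ip)) fed to the unchanged ip2long, and by a slice comprehension over range(0, len-1, 2) that groups the flat list of longs into consecutive pairs.
-- crash fix: On any input containing an IP with exactly 3 octets A raises ValueError (its trailing-dot string makes int('') fail), while B's '.'.join yields only 3 parts so ip2long returns 0 and B returns the pairing of the remaining longs. — e.g. on zhuanhuang([[[1, 2, 3]]]): A raises ValueError, B returns []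
import Mathlib
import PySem

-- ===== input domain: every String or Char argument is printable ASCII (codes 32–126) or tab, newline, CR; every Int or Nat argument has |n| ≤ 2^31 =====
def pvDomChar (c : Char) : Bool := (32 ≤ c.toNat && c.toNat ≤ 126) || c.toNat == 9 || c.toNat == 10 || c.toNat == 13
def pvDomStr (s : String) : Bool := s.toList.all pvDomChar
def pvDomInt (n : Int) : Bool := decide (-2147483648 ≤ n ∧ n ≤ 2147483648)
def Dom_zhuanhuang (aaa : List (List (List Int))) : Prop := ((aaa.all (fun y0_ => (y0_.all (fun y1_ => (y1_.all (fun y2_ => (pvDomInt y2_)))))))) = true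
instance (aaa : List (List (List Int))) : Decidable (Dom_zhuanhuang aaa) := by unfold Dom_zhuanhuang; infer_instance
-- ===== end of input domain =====

-- B replaces A's per-octet counter loop building the dotted string by '.'.join(map(str, ip))
-- and A's cccc/mod-2 pair-flushing state machine by a slice comprehension over range(0, len-1, 2) (objective: simpler).

-- ===== PORT A =====
-- ip2long: module-level helper used verbatim by BOTH Source A and Source B.
-- int(s) is PySem.Int.ofChars?; where Python raises ValueError (ofChars? = none) the port
-- takes .getD 0 — those inputs are exactly the ones Pre_zhuanhuang excludes.
def ip2long (ip : List Char) : Int :=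
  let ips := PySem.Chars.splitOn ip ['.']
  if ips.length ≠ 4 then 0
  else
    2 ^ 24 * ((PySem.Int.ofChars? (PySem.List.pyGetD ips 0 [])).getD 0)
      + 2 ^ 16 * ((PySem.Int.ofChars? (PySem.List.pyGetD ips 1 [])).getD 0)
      + 2 ^ 8 * ((PySem.Int.ofChars? (PySem.List.pyGetD ips 2 [])).getD 0)
      + (PySem.Int.ofChars? (PySem.List.pyGetD ips 3 [])).getD 0

-- loop state = (ac, cccc, list); A's list2 is assigned [] and never read, so it carries no
-- state (left out of the tuple); A's dead locals aa/bb/cc are kept as unused lets.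
def zhuanhuang (aaa : List (List (List Int))) : List (List Int) :=
  ((PySem.List.pyRange 0 (aaa.length : Int) 1).foldl
    (fun st i =>
      (PySem.List.pyGetD aaa i []).foldl
        (fun (st : List (List Int) × Int × List Int) i2 =>
          let dc := i2.foldl
            (fun (p : List Char × Int) i3 =>
              if p.2 == 3 then (p.1 ++ PySem.Int.toChars i3, p.2 + 1)
              else (p.1 ++ (PySem.Int.toChars i3 ++ ['.']), p.2 + 1)) ([], 0)
          let list := st.2.2 ++ [ip2long dc.1]
          let cccc := st.2.1 + 1
          if PySem.Int.mod cccc 2 == 0 then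
            let _aa := [PySem.List.pyGetD list 0 0]
            let _bb := [PySem.List.pyGetD list 1 0]
            let _cc := [_aa, _bb]
            (st.1 ++ [list], cccc, ([] : List Int))
          else (st.1, cccc, list)) st)
    (([] : List (List Int)), (0 : Int), ([] : List Int))).1

-- ===== PORT B =====
-- '.'.join(map(str, ip))
def joinIp (ip : List Int) : List Char :=
  PySem.Chars.join ['.'] (ip.map PySem.Int.toChars)

-- [longs[i:i+2] for i in range(0, len(longs) - 1, 2)]
def zhuanhuang_alt (aaa : List (List (List Int))) : List (List Int) :=
  let longs := aaa.flatMap (fun grp => grp.map (fun ip => ip2long (joinIp ip)))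
  (PySem.List.pyRange 0 ((longs.length : Int) - 1) 2).map
    (fun i => PySem.List.slice longs (some i) (some (i + 2)))

-- ===== PRECONDITION & SPEC =====
-- Pre_ excludes exactly the inputs where Python A raises: an IP with exactly 3 octets makes
-- dd = "a.b.c." split into 4 parts whose last part is empty, so int('') raises ValueError.
def Pre_zhuanhuang (aaa : List (List (List Int))) : Prop :=
  ∀ grp ∈ aaa, ∀ ip ∈ grp, ip.length ≠ 3
instance (aaa : List (List (List Int))) : Decidable (Pre_zhuanhuang aaa) := by
  unfold Pre_zhuanhuang; infer_instance

def pvWitness_zhuanhuang : List (List (List Int)) := [[[1, 2, 3, 4], [5, 6, 7, 8], [9, 10]]]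

-- On any input containing a 3-octet IP A raises ValueError (int('') on the trailing-dot
-- string), while B's '.'.join gives 3 parts, ip2long returns 0, and B returns the pairing.
def Raises_zhuanhuang (aaa : List (List (List Int))) : Prop :=
  ∃ grp ∈ aaa, ∃ ip ∈ grp, ip.length = 3
instance (aaa : List (List (List Int))) : Decidable (Raises_zhuanhuang aaa) := by
  unfold Raises_zhuanhuang; infer_instance

def pvRaiseWitness_zhuanhuang : List (List (List Int)) := [[[1, 2, 3]]]
def pvRaiseWitnessOut_zhuanhuang : List (List Int) := []

def Spec_zhuanhuang (aaa : List (List (List Int))) (out : List (List Int)) : Prop := out = zhuanhuang_alt aaa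
instance (aaa : List (List (List Int))) (out : List (List Int)) : Decidable (Spec_zhuanhuang aaa out) := by unfold Spec_zhuanhuang; infer_instance

-- ===== CLAIM (what is proved, stated in full; the proofs are below) =====
def Claim_equal_zhuanhuang : Prop := ∀ (aaa : List (List (List Int))), Dom_zhuanhuang aaa → Pre_zhuanhuang aaa → Spec_zhuanhuang aaa (zhuanhuang aaa)

def Claim_raises_zhuanhuang : Prop := (∀ (aaa : List (List (List Int))), Dom_zhuanhuang aaa → Raises_zhuanhuang aaa → ¬ Pre_zhuanhuang aaa) ∧ (Dom_zhuanhuang (pvRaiseWitness_zhuanhuang) ∧ Raises_zhuanhuang (pvRaiseWitness_zhuanhuang) ∧ zhuanhuang_alt (pvRaiseWitness_zhuanhuang) = pvRaiseWitnessOut_zhuanhuang)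

-- ===== LEMMAS AND PROOFS =====

-- proof-side name for B's _pairs, in structural form
def pairUp : List Int → List (List Int)
  | a :: b :: rest => [a, b] :: pairUp rest
  | _ => []

lemma range_two (n : Nat) :
    PySem.List.pyRange 0 ((n : Int) - 1) 2 = (List.range (n / 2)).map (fun k => ((2 * k : Nat) : Int)) := by
  rw [PySem.List.pyRange_of_pos 0 _ (by omega)]
  rcases Nat.lt_or_ge n 2 with h | h
  · rw [if_neg (by omega)]
    have : n / 2 = 0 := by omega
    simp [this]
  · rw [if_pos (by push_cast; omega)]
    have he : ((n : Int) - 1 - 0 + 2 - 1) / 2 = ((n : Int)) / 2 := by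
      have : ((n : Int) - 1 - 0 + 2 - 1) = (n : Int) := by ring
      rw [this]
    rw [he]
    have h2 : ((n : Int) / 2).toNat = n / 2 := by omega
    rw [h2]
    apply List.map_congr_left
    intro k _
    push_cast; ring

lemma pairSlices_eq (xs : List Int) :
    (PySem.List.pyRange 0 ((xs.length : Int) - 1) 2).map
      (fun i => PySem.List.slice xs (some i) (some (i + 2))) = pairUp xs := by
  rw [range_two xs.length, List.map_map]
  induction xs using pairUp.induct with
  | case1 a b rest ih =>
    have hl : (a :: b :: rest).length / 2 = rest.length / 2 + 1 := by simp; omega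
    rw [hl, List.range_succ_eq_map, List.map_cons, List.map_map]
    have h0 : ((fun i => PySem.List.slice (a :: b :: rest) (some i) (some (i + 2))) ∘
        fun k => ((2 * k : Nat) : Int)) 0 = [a, b] := by
      simp only [Function.comp]
      have e2 : ((2 * 0 : Nat) : Int) + 2 = ((2 : Nat) : Int) := by norm_num
      have e1 : ((2 * 0 : Nat) : Int) = ((0 : Nat) : Int) := by norm_num
      rw [e2, e1, PySem.List.slice_natCast]
      rfl
    rw [h0]
    simp only [pairUp]
    congr 1
    rw [← ih]
    apply List.map_congr_left
    intro k _
    simp only [Function.comp]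
    have hc1 : ((2 * (k + 1) : Nat) : Int) = ((2 * k + 2 : Nat) : Int) := by push_cast; ring
    have hc2 : ((2 * k + 2 : Nat) : Int) + 2 = ((2 * k + 2 + 2 : Nat) : Int) := by push_cast; ring
    have hc3 : ((2 * k : Nat) : Int) + 2 = ((2 * k + 2 : Nat) : Int) := by push_cast; ring
    rw [show (2 * (k + 1) : Nat) = 2 * k + 2 from by omega] at *
    rw [hc2, hc3, PySem.List.slice_natCast, PySem.List.slice_natCast]
    have hd : List.drop (2 * k + 2) (a :: b :: rest) = List.drop (2 * k) rest := by
      rw [show 2 * k + 2 = (2 * k + 1) + 1 from rfl]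
      rw [List.drop_succ_cons, List.drop_succ_cons]
    rw [hd]
    simp
  | case2 xs hne =>
    rcases xs with _ | ⟨a, _ | ⟨b, rest⟩⟩
    · simp [pairUp]
    · simp [pairUp]
    · exact (hne a b rest rfl).elim

-- ---- one-step unfoldings of PySem.Chars.splitOn.go for sep = ['.'] ----
lemma go_dot (f : Nat) (r : List Char) (cur : List Char) (acc : List (List Char)) :
    PySem.Chars.splitOn.go ['.'] (f+1) ('.' :: r) cur acc
      = PySem.Chars.splitOn.go ['.'] f r [] (cur.reverse :: acc) := by
  rw [PySem.Chars.splitOn.go]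
  simp [List.isPrefixOf]

lemma go_nil (f : Nat) (cur : List Char) (acc : List (List Char)) :
    PySem.Chars.splitOn.go ['.'] (f+1) [] cur acc = (cur.reverse :: acc).reverse := by
  rw [PySem.Chars.splitOn.go]
  omega

lemma go_char (c : Char) (hc : c ≠ '.') (f : Nat) (r : List Char) (cur : List Char)
    (acc : List (List Char)) :
    PySem.Chars.splitOn.go ['.'] (f+1) (c :: r) cur acc
      = PySem.Chars.splitOn.go ['.'] f r (c :: cur) acc := by
  rw [PySem.Chars.splitOn.go]
  simp only [List.isPrefixOf, Bool.and_eq_true, beq_iff_eq]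
  rw [if_neg]
  rintro ⟨h, -⟩
  exact hc h.symm

lemma goA (a : List Char) : ∀ (f : Nat) (cur : List Char) (acc : List (List Char)),
    '.' ∉ a →
    PySem.Chars.splitOn.go ['.'] (a.length + 1 + f) a cur acc
      = acc.reverse ++ [cur.reverse ++ a] := by
  induction a with
  | nil =>
    intro f cur acc _
    have : ([] : List Char).length + 1 + f = f + 1 := by simp; omega
    rw [this, go_nil]; simp
  | cons c a ih =>
    intro f cur acc h
    have hc : c ≠ '.' := fun e => h (by simp [e])
    have : (c :: a).length + 1 + f = (a.length + 1 + f) + 1 := by simp; omega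
    rw [this, go_char c hc, ih f (c :: cur) acc (fun e => h (by simp [e]))]
    simp

lemma goB (a : List Char) : ∀ (r : List Char) (f : Nat) (cur : List Char) (acc : List (List Char)),
    '.' ∉ a →
    PySem.Chars.splitOn.go ['.'] (a.length + 1 + f) (a ++ '.' :: r) cur acc
      = PySem.Chars.splitOn.go ['.'] f r [] ((cur.reverse ++ a) :: acc) := by
  induction a with
  | nil =>
    intro r f cur acc _
    have : ([] : List Char).length + 1 + f = f + 1 := by simp; omega
    rw [this]; simp only [List.nil_append]
    rw [go_dot]; simp
  | cons c a ih =>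
    intro r f cur acc h
    have hc : c ≠ '.' := fun e => h (by simp [e])
    have : (c :: a).length + 1 + f = (a.length + 1 + f) + 1 := by simp; omega
    rw [this]; simp only [List.cons_append]
    rw [go_char c hc, ih r f (c :: cur) acc (fun e => h (by simp [e]))]
    simp

lemma goJoin (ps : List (List Char)) : ∀ (acc : List (List Char)),
    ps ≠ [] → (∀ p ∈ ps, '.' ∉ p) →
    PySem.Chars.splitOn.go ['.'] ((PySem.Chars.join ['.'] ps).length + 1)
      (PySem.Chars.join ['.'] ps) [] acc = acc.reverse ++ ps := by
  induction ps with
  | nil => intro acc h; exact absurd rfl h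
  | cons p ps ih =>
    intro acc _ hd
    rcases ps with _ | ⟨q, ps⟩
    · rw [PySem.Chars.join_singleton]
      have := goA p 0 [] acc (hd p (by simp))
      simpa using this
    · rw [PySem.Chars.join_cons_cons]
      have hlen : (p ++ ['.'] ++ PySem.Chars.join ['.'] (q :: ps)).length + 1
          = p.length + 1 + ((PySem.Chars.join ['.'] (q :: ps)).length + 1) := by
        simp; omega
      rw [hlen]
      have harr : p ++ ['.'] ++ PySem.Chars.join ['.'] (q :: ps)
          = p ++ '.' :: PySem.Chars.join ['.'] (q :: ps) := by simp
      rw [harr, goB p _ _ [] acc (hd p (by simp))]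
      simp only [List.reverse_nil, List.nil_append]
      rw [ih (p :: acc) (by simp) (fun x hx => hd x (by simp [hx]))]
      simp

-- splitting the '.'-join of dot-free parts gives back the parts
lemma splitOn_join (ps : List (List Char)) (h0 : ps ≠ []) (h : ∀ p ∈ ps, '.' ∉ p) :
    PySem.Chars.splitOn (PySem.Chars.join ['.'] ps) ['.'] = ps := by
  rw [PySem.Chars.splitOn]
  simpa using goJoin ps [] h0 h

-- ---- no character of str(n) is a dot ----
lemma digitChar_ne_dot (k : Nat) : Nat.digitChar k ≠ '.' := by
  match k with
  | 0 => decide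
  | 1 => decide
  | 2 => decide
  | 3 => decide
  | 4 => decide
  | 5 => decide
  | 6 => decide
  | 7 => decide
  | 8 => decide
  | 9 => decide
  | 10 => decide
  | 11 => decide
  | 12 => decide
  | 13 => decide
  | 14 => decide
  | 15 => decide
  | (n+16) =>
    show Nat.digitChar (n+16) ≠ '.'
    unfold Nat.digitChar
    repeat rw [if_neg (by omega)]
    decide

lemma toDigitsCore_noDot (b : Nat) : ∀ (f n : Nat) (ds : List Char), '.' ∉ ds →
    '.' ∉ Nat.toDigitsCore b f n ds := by
  intro f
  induction f with
  | zero => intro n ds h; simpa [Nat.toDigitsCore] using h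
  | succ f ih =>
    intro n ds h
    rw [Nat.toDigitsCore]
    have hd : '.' ∉ (n % b).digitChar :: ds := by
      intro hm
      rcases List.mem_cons.1 hm with e | e
      · exact digitChar_ne_dot _ e.symm
      · exact h e
    split
    · exact hd
    · exact ih _ _ hd

lemma toChars_noDot (n : Int) : '.' ∉ PySem.Int.toChars n := by
  unfold PySem.Int.toChars
  split
  · intro hm
    rcases List.mem_cons.1 hm with e | e
    · exact absurd e (by decide)
    · exact toDigitsCore_noDot 10 _ _ [] (by simp) e
  · exact toDigitsCore_noDot 10 _ _ [] (by simp)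

-- ---- A's dd string, characterised as a '.'-join ----
-- A's character-accumulating inner loop builds exactly the enumerate/flatMap string
lemma dd_loop (i2 : List Int) : ∀ (pre : List Char) (c : Int),
    i2.foldl (fun (p : List Char × Int) i3 =>
        if p.2 == 3 then (p.1 ++ PySem.Int.toChars i3, p.2 + 1)
        else (p.1 ++ (PySem.Int.toChars i3 ++ ['.']), p.2 + 1)) (pre, c)
      = (pre ++ (PySem.List.enumerate i2 c).flatMap
          (fun p => if p.1 == 3 then PySem.Int.toChars p.2 else PySem.Int.toChars p.2 ++ ['.']),
         c + i2.length) := by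
  induction i2 with
  | nil => intro pre c; simp [PySem.List.enumerate_nil]
  | cons x xs ih =>
    intro pre c
    simp only [List.foldl_cons, PySem.List.enumerate_cons, List.flatMap_cons, List.length_cons]
    by_cases h : c = 3
    · simp only [if_pos (by simp [h] : ((c == 3) = true)), ih, Prod.ext_iff]
      refine ⟨by simp, by push_cast; omega⟩
    · simp only [if_neg (by simp [h] : ¬ ((c == 3) = true)), ih, Prod.ext_iff]
      refine ⟨by simp, by push_cast; omega⟩

-- A's dd string for one ip
def ddChars (ip : List Int) : List Char :=
  (PySem.List.enumerate ip 0).flatMap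
    (fun p => if p.1 == 3 then PySem.Int.toChars p.2 else PySem.Int.toChars p.2 ++ ['.'])

def brF (p : Int × Int) : List Char :=
  if p.1 == 3 then PySem.Int.toChars p.2 else PySem.Int.toChars p.2 ++ ['.']

lemma ddChars_eq_flat (ip : List Int) : ddChars ip = (PySem.List.enumerate ip 0).flatMap brF := by
  rfl

lemma join_cons_ne (p : List Char) (ps : List (List Char)) (h : ps ≠ []) :
    PySem.Chars.join ['.'] (p :: ps) = p ++ '.' :: PySem.Chars.join ['.'] ps := by
  rcases ps with _ | ⟨q, ps⟩
  · exact absurd rfl h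
  · rw [PySem.Chars.join_cons_cons]; simp

-- tail of dd past index 3: every octet gets a trailing dot
lemma tail_flat' (l : List Int) : ∀ (k : Int), 4 ≤ k →
    (PySem.List.enumerate l k).flatMap brF
      = PySem.Chars.join ['.'] (l.map PySem.Int.toChars ++ [[]]) := by
  induction l with
  | nil =>
    intro k _
    simp [PySem.List.enumerate_nil, PySem.Chars.join_singleton]
  | cons x l ih =>
    intro k hk
    rw [PySem.List.enumerate_cons]
    simp only [List.flatMap_cons, brF]
    rw [if_neg (by simp; omega)]
    rw [ih (k+1) (by omega)]
    rw [List.map_cons, List.cons_append, join_cons_ne _ _ (by simp)]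
    simp

lemma noDotMapT (l : List Int) : ∀ p ∈ l.map PySem.Int.toChars, '.' ∉ p := by
  intro p hp
  rcases List.mem_map.1 hp with ⟨x, -, rfl⟩
  exact toChars_noDot x

lemma noDotMapT' (l : List Int) : ∀ p ∈ l.map PySem.Int.toChars ++ [[]], '.' ∉ p := by
  intro p hp
  rcases List.mem_append.1 hp with h | h
  · exact noDotMapT l p h
  · simp at h; simp [h]

-- ip2long of a join of dot-free parts whose count is not 4 is 0
lemma ip2long_join_ne4 (ps : List (List Char)) (h0 : ps ≠ []) (hd : ∀ p ∈ ps, '.' ∉ p)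
    (hl : ps.length ≠ 4) : ip2long (PySem.Chars.join ['.'] ps) = 0 := by
  unfold ip2long
  rw [splitOn_join ps h0 hd]
  simp [hl]

-- the central per-IP fact: on IPs that do not have exactly 3 octets,
-- A's dotted string and B's joined string give the same long
lemma key (ip : List Int) (h : ip.length ≠ 3) : ip2long (ddChars ip) = ip2long (joinIp ip) := by
  rcases ip with _ | ⟨a, _ | ⟨b, _ | ⟨c, _ | ⟨d, rest⟩⟩⟩⟩
  · -- []
    rw [ddChars_eq_flat]
    simp only [PySem.List.enumerate_nil, List.flatMap_nil, joinIp, List.map_nil,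
      PySem.Chars.join_nil]
  · -- [a]
    rw [ddChars_eq_flat]
    rw [PySem.List.enumerate_cons]
    simp only [PySem.List.enumerate_nil, List.flatMap_cons, List.flatMap_nil, brF]
    rw [if_neg (by decide), List.append_nil]
    have hdd : PySem.Int.toChars a ++ ['.']
        = PySem.Chars.join ['.'] ([a].map PySem.Int.toChars ++ [[]]) := by
      simp [PySem.Chars.join_cons_cons, PySem.Chars.join_singleton]
    rw [hdd, ip2long_join_ne4 _ (by simp) (noDotMapT' [a]) (by simp),
      joinIp, ip2long_join_ne4 _ (by simp) (noDotMapT [a]) (by simp)]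
  · -- [a, b]
    rw [ddChars_eq_flat]
    rw [PySem.List.enumerate_cons, PySem.List.enumerate_cons]
    simp only [PySem.List.enumerate_nil, List.flatMap_cons, List.flatMap_nil, brF]
    rw [if_neg (by decide), if_neg (by decide), List.append_nil]
    have hdd : (PySem.Int.toChars a ++ ['.']) ++ (PySem.Int.toChars b ++ ['.'])
        = PySem.Chars.join ['.'] ([a, b].map PySem.Int.toChars ++ [[]]) := by
      simp [PySem.Chars.join_cons_cons, PySem.Chars.join_singleton]
    rw [hdd, ip2long_join_ne4 _ (by simp) (noDotMapT' [a, b]) (by simp),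
      joinIp, ip2long_join_ne4 _ (by simp) (noDotMapT [a, b]) (by simp)]
  · -- [a, b, c] excluded by Pre_
    simp at h
  · -- a :: b :: c :: d :: rest
    rw [ddChars_eq_flat]
    rw [PySem.List.enumerate_cons, PySem.List.enumerate_cons, PySem.List.enumerate_cons,
      PySem.List.enumerate_cons]
    simp only [List.flatMap_cons, brF]
    rw [if_neg (by decide), if_neg (by decide), if_neg (by decide), if_pos (by decide)]
    rcases rest with _ | ⟨e, rest⟩
    · -- exactly 4 octets: the two strings coincide
      simp only [PySem.List.enumerate_nil, List.flatMap_nil, List.append_nil]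
      have hdd : (PySem.Int.toChars a ++ ['.']) ++ ((PySem.Int.toChars b ++ ['.'])
            ++ ((PySem.Int.toChars c ++ ['.']) ++ PySem.Int.toChars d))
          = joinIp [a, b, c, d] := by
        simp [joinIp, PySem.Chars.join_cons_cons, PySem.Chars.join_singleton]
      rw [hdd]
    · -- 5 or more octets: both sides are 0
      norm_num only
      rw [tail_flat' (e :: rest) 4 (by omega)]
      rw [List.map_cons, List.cons_append, join_cons_ne _ _ (by simp)]
      -- t d and t e are concatenated without a separator: one merged part
      have hm : PySem.Int.toChars d ++ (PySem.Int.toChars e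
            ++ '.' :: PySem.Chars.join ['.'] (rest.map PySem.Int.toChars ++ [[]]))
          = PySem.Chars.join ['.']
              ((PySem.Int.toChars d ++ PySem.Int.toChars e) :: (rest.map PySem.Int.toChars ++ [[]])) := by
        rw [join_cons_ne _ _ (by simp)]
        simp
      rw [hm]
      have hdd : (PySem.Int.toChars a ++ ['.']) ++ ((PySem.Int.toChars b ++ ['.'])
            ++ ((PySem.Int.toChars c ++ ['.']) ++ PySem.Chars.join ['.']
              ((PySem.Int.toChars d ++ PySem.Int.toChars e) :: (rest.map PySem.Int.toChars ++ [[]]))))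
          = PySem.Chars.join ['.']
              (PySem.Int.toChars a :: PySem.Int.toChars b :: PySem.Int.toChars c
                :: (PySem.Int.toChars d ++ PySem.Int.toChars e) :: (rest.map PySem.Int.toChars ++ [[]])) := by
        rw [join_cons_ne (PySem.Int.toChars a) _ (by simp),
          join_cons_ne (PySem.Int.toChars b) _ (by simp),
          join_cons_ne (PySem.Int.toChars c) _ (by simp)]
        simp
      rw [hdd]
      have hnd : ∀ p ∈ (PySem.Int.toChars a :: PySem.Int.toChars b :: PySem.Int.toChars c
            :: (PySem.Int.toChars d ++ PySem.Int.toChars e) :: (rest.map PySem.Int.toChars ++ [[]])), '.' ∉ p := by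
        intro p hp
        rcases List.mem_cons.1 hp with rfl | hp
        · exact toChars_noDot a
        rcases List.mem_cons.1 hp with rfl | hp
        · exact toChars_noDot b
        rcases List.mem_cons.1 hp with rfl | hp
        · exact toChars_noDot c
        rcases List.mem_cons.1 hp with rfl | hp
        · intro hm'
          rcases List.mem_append.1 hm' with h' | h'
          · exact toChars_noDot d h'
          · exact toChars_noDot e h'
        · exact noDotMapT' rest p hp
      rw [ip2long_join_ne4 _ (by simp) hnd (by simp),
        joinIp, ip2long_join_ne4 _ (by simp) (noDotMapT _) (by simp)]

-- ---- A's pair-flushing machinery ----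
-- proof-side name for A's pair-flushing step, acting on an already converted long
def step2 (st : List (List Int) × Int × List Int) (v : Int) : List (List Int) × Int × List Int :=
  if PySem.Int.mod (st.2.1 + 1) 2 == 0 then (st.1 ++ [st.2.2 ++ [v]], st.2.1 + 1, [])
  else (st.1, st.2.1 + 1, st.2.2 ++ [v])

-- A's per-IP loop body is step2 applied to the long of its dd string
lemma body_eq (st : List (List Int) × Int × List Int) (i2 : List Int) :
    (let dc := i2.foldl
        (fun (p : List Char × Int) i3 =>
          if p.2 == 3 then (p.1 ++ PySem.Int.toChars i3, p.2 + 1)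
          else (p.1 ++ (PySem.Int.toChars i3 ++ ['.']), p.2 + 1)) ([], 0)
      let list := st.2.2 ++ [ip2long dc.1]
      let cccc := st.2.1 + 1
      if PySem.Int.mod cccc 2 == 0 then
        let _aa := [PySem.List.pyGetD list 0 0]
        let _bb := [PySem.List.pyGetD list 1 0]
        let _cc := [_aa, _bb]
        (st.1 ++ [list], cccc, ([] : List Int))
      else (st.1, cccc, list))
    = step2 st (ip2long (ddChars i2)) := by
  rw [dd_loop i2 [] 0]
  simp [step2, ddChars]

-- the pair-flushing fold over the stream of converted longs is pairUp
lemma pair_loop_even (vals : List Int) : ∀ (ac : List (List Int)) (c : Int),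
    (2 : Int) ∣ c →
    (vals.foldl step2 (ac, c, ([] : List Int))).1 = ac ++ pairUp vals := by
  induction vals using pairUp.induct with
  | case1 a b rest ih =>
    intro ac c h
    have hn : ¬ (2:Int) ∣ c + 1 := by omega
    have hp : (2:Int) ∣ c + 1 + 1 := by omega
    have e1 : step2 (ac, c, ([]:List Int)) a = (ac, c + 1, [a]) := by
      simp [step2, beq_iff_eq, hn]
    have e2 : step2 (ac, c + 1, [a]) b = (ac ++ [[a, b]], c + 1 + 1, ([]:List Int)) := by
      simp [step2, beq_iff_eq, hp]
    rw [List.foldl_cons, List.foldl_cons, e1, e2, ih _ _ (by omega)]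
    simp [pairUp]
  | case2 vals hne =>
    intro ac c h
    rcases vals with _ | ⟨a, _ | ⟨b, rest⟩⟩
    · simp [pairUp]
    · have hn : ¬ (2:Int) ∣ c + 1 := by omega
      have e1 : step2 (ac, c, ([]:List Int)) a = (ac, c + 1, [a]) := by
        simp [step2, beq_iff_eq, hn]
      rw [List.foldl_cons, List.foldl_nil, e1]
      simp [pairUp]
    · exact (hne a b rest rfl).elim

theorem zhuanhuang_eq_alt (aaa : List (List (List Int))) (hpre : Pre_zhuanhuang aaa) :
    zhuanhuang aaa = zhuanhuang_alt aaa := by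
  unfold zhuanhuang zhuanhuang_alt
  rw [PySem.List.foldl_pyRange_zero_pyGetD' aaa []]
  simp only [body_eq]
  have hp := pair_loop_even ((aaa.map (fun grp => grp.map (fun ip => ip2long (ddChars ip)))).flatten)
    [] 0 ⟨0, by ring⟩
  simp only [List.foldl_flatten, List.foldl_map] at hp
  rw [hp, pairSlices_eq]
  have hsame : (aaa.map (fun grp => grp.map (fun ip => ip2long (ddChars ip)))).flatten
      = aaa.flatMap (fun grp => grp.map (fun ip => ip2long (joinIp ip))) := by
    rw [List.flatMap_def]
    congr 1
    refine List.map_congr_left (fun grp hg => ?_)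
    exact List.map_congr_left (fun ip hi => key ip (hpre grp hg ip hi))
  rw [hsame]
  simp

-- ===== VERDICT (by name: the statement is the Claim_ definition above) =====
theorem zhuanhuang_spec : Claim_equal_zhuanhuang := by
  intro aaa _ hpre
  unfold Spec_zhuanhuang
  exact zhuanhuang_eq_alt aaa hpre

@[simp] theorem zhuanhuang_raises : Claim_raises_zhuanhuang := by
  unfold Claim_raises_zhuanhuang
  constructor
  · intro aaa _ ⟨grp, hg, ip, hi, h3⟩ hpre
    exact hpre grp hg ip hi h3
  · refine ⟨by decide, ⟨[[1,2,3]], by decide, [1,2,3], by decide, by decide⟩, ?_⟩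
    show zhuanhuang_alt [[[1, 2, 3]]] = []
    unfold zhuanhuang_alt
    rw [pairSlices_eq]
    rfl
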